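-- pv_equiv track=rewrite | github.com/ryantheengineer/datascience | test_sales_forecasting.py | get_past_n_months
-- ===== SOURCE A (Python) =====
-- def get_past_n_months(current_month, current_year, n):
--     months = []
--     for _ in range(n):
--         if current_month == 1:  # If current month is January, decrement year and set month to December
--             current_month = 12
--             current_year -= 1
--         else:
--             current_month -= 1
--
--         months.append((current_month, current_year))
--
--     months.reverse()
--
--     return months
-- ===== SOURCE B (Python) =====
-- def get_past_n_months(current_month, current_year, n):
--     # Absolute month index of the current month; each past month is computed
--     # by one floored divmod, in chronological order.
--     idx = current_year * 12 + current_month - 1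
--     months = []
--     for offset in range(n):
--         year, m = divmod(idx - n + offset, 12)
--         months.append((m + 1, year))
--     return months
-- ===== Notes on version B (the rewrite author's own statement) =====
-- stated objective: simpler
-- what changed: B replaces A's stateful backwards month/year loop with a January conditional plus a final reverse() by a stateless forward build: one floored divmod of an absolute month index per output pair; Pre_ restricts current_month to the calendar range 1..12 (the function's natural domain) when n >= 1, because on malformed months A's conditional decrement returns non-calendar pairs like (-1, y) or (14, y) while B wraps them into real calendar months.
-- outside the precondition, e.g. on get_past_n_months(0, 2020, 2): A returns [(-2, 2020), (-1, 2020)], B returns [(10, 2019), (11, 2019)]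
import Mathlib
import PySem

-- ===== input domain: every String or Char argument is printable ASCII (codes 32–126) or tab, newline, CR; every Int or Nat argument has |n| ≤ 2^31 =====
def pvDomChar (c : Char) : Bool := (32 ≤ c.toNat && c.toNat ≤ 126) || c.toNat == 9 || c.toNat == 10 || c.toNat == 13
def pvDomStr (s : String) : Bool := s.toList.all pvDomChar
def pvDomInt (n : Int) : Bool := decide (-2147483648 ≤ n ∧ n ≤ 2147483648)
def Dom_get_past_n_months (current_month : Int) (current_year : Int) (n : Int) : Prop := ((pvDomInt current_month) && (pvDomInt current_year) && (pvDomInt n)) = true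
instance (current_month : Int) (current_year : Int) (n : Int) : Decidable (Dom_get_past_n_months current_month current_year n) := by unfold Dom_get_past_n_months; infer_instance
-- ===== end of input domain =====

-- B replaces A's stateful backwards loop + reverse by a stateless forward build via one
-- floored divmod per pair (objective: simpler decomposition, same cost); Pre_ keeps
-- current_month in the calendar range 1..12 (or n <= 0, where no pairs are produced).


-- ===== PORT A =====
-- literal port: loop over range(n) carrying (current_month, current_year, months), then reverse
def get_past_n_months (current_month : Int) (current_year : Int) (n : Int) : List (Int × Int) :=
  let r := (PySem.List.pyRange 0 n 1).foldl
    (fun (st : Int × Int × List (Int × Int)) (_ : Int) =>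
      match st with
      | (cm, cy, months) =>
        if cm = 1 then (12, cy - 1, months ++ [(12, cy - 1)])
        else (cm - 1, cy, months ++ [(cm - 1, cy)]))
    (current_month, current_year, [])
  r.2.2.reverse

-- ===== PORT B =====
-- literal port of Source B: loop offset over range(n); divmod(x, 12) with the nonzero literal
-- divisor 12 is ported exactly as (PySem.Int.floordiv x 12, PySem.Int.mod x 12)
def get_past_n_months_alt (current_month : Int) (current_year : Int) (n : Int) : List (Int × Int) :=
  let idx := current_year * 12 + current_month - 1
  (PySem.List.pyRange 0 n 1).foldl
    (fun (months : List (Int × Int)) (offset : Int) =>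
      let year := PySem.Int.floordiv (idx - n + offset) 12
      let m := PySem.Int.mod (idx - n + offset) 12
      months ++ [(m + 1, year)])
    []

-- ===== PRECONDITION & SPEC =====
-- Pre_ restricts current_month to the calendar range 1..12, the function's natural domain:
-- on malformed months A's conditional decrement returns non-calendar pairs such as (-1, y)
-- or (14, y), an artefact no caller would specify, while B wraps them into real calendar
-- months; calls with n <= 0 produce no pairs at all, so any month is admitted there.
def Pre_get_past_n_months (current_month : Int) (current_year : Int) (n : Int) : Prop :=
  (1 ≤ current_month ∧ current_month ≤ 12) ∨ n ≤ 0
instance (current_month : Int) (current_year : Int) (n : Int) : Decidable (Pre_get_past_n_months current_month current_year n) := by unfold Pre_get_past_n_months; infer_instance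

def pvWitness_get_past_n_months : Int × Int × Int := (7, 2023, 3)

def Spec_get_past_n_months (current_month : Int) (current_year : Int) (n : Int) (out : List (Int × Int)) : Prop := out = get_past_n_months_alt current_month current_year n
instance (current_month : Int) (current_year : Int) (n : Int) (out : List (Int × Int)) : Decidable (Spec_get_past_n_months current_month current_year n out) := by unfold Spec_get_past_n_months; infer_instance

-- ===== CLAIM (what is proved, stated in full; the proofs are below) =====
def Claim_equal_get_past_n_months : Prop := ∀ (current_month : Int) (current_year : Int) (n : Int), Dom_get_past_n_months current_month current_year n → Pre_get_past_n_months current_month current_year n → Spec_get_past_n_months current_month current_year n (get_past_n_months current_month current_year n)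

-- ===== LEMMAS AND PROOFS =====

-- one step of A's loop on the (month, year) state
def pvStep (s : Int × Int) : Int × Int := if s.1 = 1 then (12, s.2 - 1) else (s.1 - 1, s.2)

-- the body of A's loop, named (definitionally equal to the lambda in the port)
def pvBodyA (st : Int × Int × List (Int × Int)) (_ : Int) : Int × Int × List (Int × Int) :=
  if st.1 = 1 then (12, st.2.1 - 1, st.2.2 ++ [(12, st.2.1 - 1)])
  else (st.1 - 1, st.2.1, st.2.2 ++ [(st.1 - 1, st.2.1)])

-- B's closed form for the pair at absolute month index a
def pvF (a : Int) : Int × Int := (PySem.Int.mod a 12 + 1, PySem.Int.floordiv a 12)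

lemma pvStep_eval (a b : Int) : pvStep (a, b) = if a = 1 then (12, b - 1) else (a - 1, b) := rfl

lemma pv_dm_unique (a q r : Int) (h : q * 12 + r = a) (h0 : 0 ≤ r) (h1 : r < 12) :
    PySem.Int.floordiv a 12 = q ∧ PySem.Int.mod a 12 = r := by
  have hq : PySem.Int.floordiv a 12 = q := by
    rw [PySem.Int.floordiv_eq_iff_of_pos (by omega : (0:Int) < 12)]
    omega
  have := PySem.Int.floordiv_mul_add_mod a 12
  exact ⟨hq, by omega⟩

-- A's state after k steps from a calendar-range start equals B's closed form at index idx - k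
lemma pv_iterF (k : Nat) (m y : Int) (hm : 1 ≤ m ∧ m ≤ 12) :
    pvStep^[k] (m, y) = pvF (y * 12 + m - 1 - k) := by
  induction k with
  | zero =>
    have h0 : y * 12 + m - 1 - ((0 : Nat) : Int) = y * 12 + m - 1 := by push_cast; ring
    obtain ⟨hq, hr⟩ := pv_dm_unique (y * 12 + m - 1) y (m - 1) (by omega) (by omega) (by omega)
    simp only [Function.iterate_zero_apply, pvF, h0, hq, hr, Prod.mk.injEq]
    exact ⟨by omega, trivial⟩
  | succ k ih =>
    rw [Function.iterate_succ_apply', ih]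
    set a : Int := y * 12 + m - 1 - k with ha
    have hr0 := PySem.Int.mod_nonneg a (by omega : (0:Int) < 12)
    have hr1 := PySem.Int.mod_lt a (by omega : (0:Int) < 12)
    have hqr := PySem.Int.floordiv_mul_add_mod a 12
    have he : y * 12 + m - 1 - ((k : Nat) + 1 : Nat) = a - 1 := by push_cast; omega
    rw [he]
    by_cases hz : PySem.Int.mod a 12 = 0
    · obtain ⟨hq', hr'⟩ := pv_dm_unique (a - 1) (PySem.Int.floordiv a 12 - 1) 11
        (by omega) (by omega) (by omega)
      simp only [pvF, hz, pvStep_eval, if_pos (by norm_num : (0:Int) + 1 = 1), hq', hr']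
      norm_num
    · obtain ⟨hq', hr'⟩ := pv_dm_unique (a - 1) (PySem.Int.floordiv a 12)
        (PySem.Int.mod a 12 - 1) (by omega) (by omega) (by omega)
      simp only [pvF, pvStep_eval, if_neg (by omega : ¬ PySem.Int.mod a 12 + 1 = 1), hq', hr']
      simp only [Prod.mk.injEq]
      exact ⟨by ring, trivial⟩

-- closed form of A's loop over any index list
lemma pv_loopA (L : List Int) (m y : Int) (acc : List (Int × Int)) :
    L.foldl pvBodyA (m, y, acc)
    = ((pvStep^[L.length] (m, y)).1, (pvStep^[L.length] (m, y)).2,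
       acc ++ (List.range L.length).map (fun i => pvStep^[i + 1] (m, y))) := by
  induction L generalizing m y acc with
  | nil => simp
  | cons a L ih =>
    have hb : pvBodyA (m, y, acc) a = ((pvStep (m, y)).1, (pvStep (m, y)).2, acc ++ [pvStep (m, y)]) := by
      simp only [pvBodyA, pvStep]
      split_ifs with h <;> rfl
    rw [List.foldl_cons, hb, ih]
    have h1 : pvStep^[(a :: L).length] (m, y) = pvStep^[L.length] (pvStep (m, y)) := by
      rw [List.length_cons, Function.iterate_succ_apply]
    have h2 : (List.range (a :: L).length).map (fun i => pvStep^[i + 1] (m, y))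
        = pvStep (m, y) :: (List.range L.length).map (fun i => pvStep^[i + 1] (pvStep (m, y))) := by
      rw [List.length_cons, List.range_succ_eq_map, List.map_cons, List.map_map,
          show (fun i => pvStep^[i + 1] (m, y)) ∘ Nat.succ
              = (fun i => pvStep^[i + 1] (pvStep (m, y)))
            from funext fun i => Function.iterate_succ_apply pvStep (i + 1) (m, y)]
      rfl
    rw [h1, h2]
    simp [List.append_assoc]

-- B's foldl is a map of pvF over the offset range
lemma pv_B_eq_map (m y n : Int) :
    get_past_n_months_alt m y n
    = (PySem.List.pyRange 0 n 1).map (fun offset => pvF (y * 12 + m - 1 - n + offset)) := by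
  show (PySem.List.pyRange 0 n 1).foldl
      (fun (months : List (Int × Int)) (offset : Int) =>
        months ++ [pvF (y * 12 + m - 1 - n + offset)]) [] = _
  rw [PySem.List.foldl_append_singleton_eq_map]
  simp

-- extension of pv_iterF to a start month 13 (one step brings the state into 1..12)
lemma pv_iterF13 (k : Nat) (m y : Int) (hm : 1 ≤ m ∧ m ≤ 13) (hk : 1 ≤ k) :
    pvStep^[k] (m, y) = pvF (y * 12 + m - 1 - k) := by
  obtain ⟨j, rfl⟩ : ∃ j, k = j + 1 := ⟨k - 1, by omega⟩
  rw [Function.iterate_succ_apply]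
  by_cases h1 : m = 1
  · subst h1
    rw [show pvStep (1, y) = (12, y - 1) from rfl,
        pv_iterF j 12 (y - 1) ⟨by norm_num, by norm_num⟩]
    congr 1
    push_cast
    ring
  · rw [pvStep_eval, if_neg h1, pv_iterF j (m - 1) y ⟨by omega, by omega⟩]
    congr 1
    push_cast
    ring

theorem pv_main (m y n : Int) (hm : (1 ≤ m ∧ m ≤ 13) ∨ n ≤ 0) :
    get_past_n_months m y n = get_past_n_months_alt m y n := by
  rw [pv_B_eq_map]
  show ((PySem.List.pyRange 0 n 1).foldl pvBodyA (m, y, [])).2.2.reverse = _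
  rcases hm with hm | hn
  · rw [pv_loopA]
    simp only [List.nil_append, PySem.List.length_pyRange_one, Int.sub_zero]
    apply List.ext_getElem
    · simp [PySem.List.length_pyRange_one]
    · intro i h1 h2
      simp only [List.length_reverse, List.length_map, List.length_range] at h1
      rw [List.getElem_reverse]
      simp only [List.getElem_map, List.getElem_range, List.length_map, List.length_range,
        PySem.List.getElem_pyRange_one]
      rw [pv_iterF13 (n.toNat - 1 - i + 1) m y hm (by omega)]
      congr 1
      have : i < n.toNat := h1
      push_cast [Nat.sub_sub]
      omega
  · rw [PySem.List.pyRange_one_eq_nil (by omega : n ≤ 0)]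
    rfl

-- ===== VERDICT (by name: the statement is the Claim_ definition above) =====
theorem get_past_n_months_spec : Claim_equal_get_past_n_months := by
  intro m y n _ hpre
  unfold Spec_get_past_n_months
  unfold Pre_get_past_n_months at hpre
  exact pv_main m y n (by omega)
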